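-- pv_equiv track=rewrite | github.com/khatvangi/protein-semantic-collapse | scripts/analyze_ptm_de_enrichment.py | find_de_rich_segments
-- ===== SOURCE A (Python) =====
-- def find_de_rich_segments(sequence, min_length=3):
--     """find D/E-rich segments (>=min_length consecutive D/E)"""
--     segments = []
--     i = 0
--     while i < len(sequence):
--         if sequence[i] in 'DE':
--             start = i
--             while i < len(sequence) and sequence[i] in 'DE':
--                 i += 1
--             if i - start >= min_length:
--                 segments.append((start, i))  # 0-indexed, exclusive end
--         else:
--             i += 1
--     return segments
-- ===== SOURCE B (Python) =====
-- def find_de_rich_segments(sequence, min_length=3):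
--     """find D/E-rich segments (>=min_length consecutive D/E)"""
--     # Phase 1: run-length encode the sequence by D/E membership.
--     runs = []
--     for c in sequence:
--         k = c in 'DE'
--         if runs and runs[-1][0] == k:
--             runs[-1][1] += 1
--         else:
--             runs.append([k, 1])
--     # Phase 2: emit qualifying D/E runs with running positions.
--     segments = []
--     pos = 0
--     for k, n in runs:
--         if k and n >= min_length:
--             segments.append((pos, pos + n))
--         pos += n
--     return segments
-- ===== Notes on version B (the rewrite author's own statement) =====
-- stated objective: alternative
-- what changed: Replaced the nested index-based while loops with a two-phase pass: run-length encode the sequence by D/E membership, then emit qualifying runs from the encoding with a running position counter.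
import Mathlib
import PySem

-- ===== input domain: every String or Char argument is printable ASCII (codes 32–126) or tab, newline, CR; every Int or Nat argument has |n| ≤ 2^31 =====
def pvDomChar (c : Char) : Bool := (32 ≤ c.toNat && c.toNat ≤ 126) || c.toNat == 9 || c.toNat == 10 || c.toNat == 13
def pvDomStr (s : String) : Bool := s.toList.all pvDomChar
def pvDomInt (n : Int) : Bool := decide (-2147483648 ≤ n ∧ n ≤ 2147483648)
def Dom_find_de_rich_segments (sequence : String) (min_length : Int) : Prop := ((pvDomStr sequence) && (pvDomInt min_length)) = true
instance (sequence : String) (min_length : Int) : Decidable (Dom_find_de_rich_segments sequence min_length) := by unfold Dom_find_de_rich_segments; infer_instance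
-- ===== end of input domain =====

-- B replaces A's nested index-scanning while loops with a two-phase pass
-- (run-length encode by D/E membership, then emit qualifying runs): an alternative decomposition, same cost.


-- ===== PORT A =====
-- `c in 'DE'`
def isDE (c : Char) : Bool := c == 'D' || c == 'E'

-- inner while loop of A: advance i over consecutive D/E; the remaining suffix plays the role of sequence[i:]
def scanRun (cs : List Char) (i : Nat) : List Char × Nat :=
  match cs with
  | [] => ([], i)
  | c :: rest => if isDE c then scanRun rest (i + 1) else (c :: rest, i)

-- characterization, needed for termination of loopA
theorem scanRun_eq (cs : List Char) (i : Nat) :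
    scanRun cs i = (cs.dropWhile isDE, i + (cs.takeWhile isDE).length) := by
  induction cs generalizing i with
  | nil => simp [scanRun]
  | cons c rest ih =>
    by_cases h : isDE c
    · simp [scanRun, h, ih]
      omega
    · simp [scanRun, h]

-- outer while loop of A: cs is the suffix sequence[i:], segs the accumulator
def loopA (cs : List Char) (i : Nat) (min_length : Int) (segs : List (Int × Int)) :
    List (Int × Int) :=
  match hcs : cs with
  | [] => segs
  | c :: rest =>
    if h : isDE c then
      let p := scanRun cs i
      loopA p.1 p.2 min_length
        (if (p.2 : Int) - (i : Int) ≥ min_length then segs ++ [((i : Int), (p.2 : Int))] else segs)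
    else
      loopA rest (i + 1) min_length segs
  termination_by cs.length
  decreasing_by
  · simp [scanRun_eq, hcs, h]
    exact List.length_dropWhile_le _ _
  · simp [hcs]

def find_de_rich_segments (sequence : String) (min_length : Int) : List (Int × Int) :=
  loopA sequence.toList 0 min_length []

-- ===== PORT B =====
-- phase 1 of B: one step of the run-length encoding fold; acc holds the runs most-recent-first
def rleStep (acc : List (Bool × Nat)) (c : Char) : List (Bool × Nat) :=
  let k := isDE c
  match acc with
  | (k', n) :: t => if k' = k then (k', n + 1) :: t else (k, 1) :: (k', n) :: t
  | [] => [(k, 1)]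

-- phase 2 of B: emit qualifying runs with a running position
def emitB (runs : List (Bool × Nat)) (pos : Int) (min_length : Int) : List (Int × Int) :=
  match runs with
  | [] => []
  | (k, n) :: rest =>
    (if k && (n : Int) ≥ min_length then [(pos, pos + (n : Int))] else []) ++
      emitB rest (pos + (n : Int)) min_length

def find_de_rich_segments_alt (sequence : String) (min_length : Int) : List (Int × Int) :=
  emitB ((sequence.toList.foldl rleStep []).reverse) 0 min_length

-- ===== PRECONDITION & SPEC =====
def Spec_find_de_rich_segments (sequence : String) (min_length : Int) (out : List (Int × Int)) : Prop := out = find_de_rich_segments_alt sequence min_length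
instance (sequence : String) (min_length : Int) (out : List (Int × Int)) : Decidable (Spec_find_de_rich_segments sequence min_length out) := by unfold Spec_find_de_rich_segments; infer_instance

-- ===== CLAIM (what is proved, stated in full; the proofs are below) =====
def Claim_equal_find_de_rich_segments : Prop := ∀ (sequence : String) (min_length : Int), Dom_find_de_rich_segments sequence min_length → Spec_find_de_rich_segments sequence min_length (find_de_rich_segments sequence min_length)

-- ===== LEMMAS AND PROOFS =====

-- abstract (right-recursive) run-length encoding, the bridge between the two ports
def consRun (k : Bool) (n : Nat) (g : List (Bool × Nat)) : List (Bool × Nat) :=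
  match g with
  | (k', n') :: g' => if k = k' then (k, n + n') :: g' else (k, n) :: (k', n') :: g'
  | [] => [(k, n)]

def runsOf : List Char → List (Bool × Nat)
  | [] => []
  | c :: rest => consRun (isDE c) 1 (runsOf rest)

theorem consRun_consRun (k : Bool) (n : Nat) (g : List (Bool × Nat)) :
    consRun k n (consRun k 1 g) = consRun k (n + 1) g := by
  match g with
  | [] => simp [consRun]
  | (k', n') :: g' =>
    by_cases h : k = k'
    · simp [consRun, h]; omega
    · simp [consRun, h]

theorem consRun_head (k : Bool) (n : Nat) (g : List (Bool × Nat)) :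
    ∃ m g', consRun k n g = (k, m) :: g' := by
  match g with
  | [] => exact ⟨n, [], rfl⟩
  | (k', n') :: g' =>
    by_cases h : k = k'
    · exact ⟨n + n', g', by simp [consRun, h]⟩
    · exact ⟨n, (k', n') :: g', by simp [consRun, h]⟩

-- B's left fold computes the abstract encoding
theorem foldl_rleStep (cs : List Char) (k : Bool) (n : Nat) (t : List (Bool × Nat)) :
    (List.foldl rleStep ((k, n) :: t) cs).reverse = t.reverse ++ consRun k n (runsOf cs) := by
  induction cs generalizing k n t with
  | nil => simp [runsOf, consRun]
  | cons c rest ih =>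
    by_cases h : k = isDE c
    · have : rleStep ((k, n) :: t) c = (k, n + 1) :: t := by simp [rleStep, h]
      rw [List.foldl_cons, this, ih, runsOf, ← h, consRun_consRun]
    · have hstep : rleStep ((k, n) :: t) c = (isDE c, 1) :: (k, n) :: t := by
        simp only [rleStep]; rw [if_neg h]
      rw [List.foldl_cons, hstep, ih (isDE c) 1 ((k, n) :: t)]
      obtain ⟨m, g', hg⟩ := consRun_head (isDE c) 1 (runsOf rest)
      rw [show runsOf (c :: rest) = consRun (isDE c) 1 (runsOf rest) from rfl, hg]
      simp [consRun, h]

theorem runs_spec (cs : List Char) :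
    (List.foldl rleStep [] cs).reverse = runsOf cs := by
  match cs with
  | [] => rfl
  | c :: rest =>
    have : List.foldl rleStep [] (c :: rest) = List.foldl rleStep [(isDE c, 1)] rest := by
      simp [rleStep]
    rw [this, foldl_rleStep rest (isDE c) 1 []]
    simp [runsOf]

-- skipping the head of a non-D/E run equals skipping the whole run
theorem emitB_consRun_false (g : List (Bool × Nat)) (i min_length : Int) :
    emitB (consRun false 1 g) i min_length = emitB g (i + 1) min_length := by
  match g with
  | [] => simp [consRun, emitB]
  | (k, n) :: g' =>
    cases k with
    | false =>
      simp [consRun, emitB]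
      congr 1
      ring_nf
    | true => simp [consRun, emitB]

-- runsOf splits off the leading maximal D/E run
theorem runsOf_cons_split (cs : List Char) (c : Char) :
    runsOf (c :: cs) =
      (isDE c, 1 + (cs.takeWhile (fun d => isDE d == isDE c)).length) ::
        runsOf (cs.dropWhile (fun d => isDE d == isDE c)) := by
  induction cs generalizing c with
  | nil => simp [runsOf, consRun]
  | cons d rest ih =>
    by_cases h : isDE d = isDE c
    · have hf : (fun e => isDE e == isDE c) = (fun e => isDE e == isDE d) := by
        funext e; rw [h]
      rw [runsOf, ih d]
      simp only [List.takeWhile_cons, List.dropWhile_cons, hf]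
      simp [h, consRun]
      omega
    · rw [runsOf, ih d]
      have h' : ¬ (isDE c = isDE d) := fun hc => h hc.symm
      simp only [List.takeWhile_cons, List.dropWhile_cons]
      simp [h, consRun, h', ih d]

-- main invariant: A's outer loop equals B's emission over the abstract encoding
theorem loopA_emitB (fuel : Nat) (cs : List Char) (hf : cs.length ≤ fuel)
    (i : Nat) (min_length : Int) (segs : List (Int × Int)) :
    loopA cs i min_length segs = segs ++ emitB (runsOf cs) (i : Int) min_length := by
  induction fuel generalizing cs i segs with
  | zero =>
    have : cs = [] := by
      cases cs with
      | nil => rfl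
      | cons a b => simp at hf
    subst this; simp [loopA, runsOf, emitB]
  | succ f ih =>
    match cs with
    | [] => simp [loopA, runsOf, emitB]
    | c :: rest =>
      by_cases h : isDE c
      · rw [loopA]
        simp only [h, dif_pos, scanRun_eq]
        have htw : List.takeWhile isDE (c :: rest) = c :: List.takeWhile isDE rest := by
          simp [h]
        have hdw : List.dropWhile isDE (c :: rest) = List.dropWhile isDE rest := by
          simp [h]
        have hlen : (List.dropWhile isDE rest).length ≤ f := by
          have := List.length_dropWhile_le isDE rest
          simp at hf; omega
        rw [htw, hdw]
        rw [ih (List.dropWhile isDE rest) hlen]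
        have hpred : (fun d => isDE d == isDE c) = isDE := by
          funext e; simp [h]
        rw [runsOf_cons_split, hpred, emitB]
        have e1 : ((i + (c :: List.takeWhile isDE rest).length : Nat) : Int)
            = (i : Int) + ((1 + (List.takeWhile isDE rest).length : Nat) : Int) := by
          simp only [List.length_cons]; push_cast; ring
        rw [e1]
        split_ifs with h1 h2 h3
        · simp
        · exfalso; push_cast at h1
          have h2' : ¬ ((1 : Int) + ((List.takeWhile isDE rest).length : Int) ≥ min_length) := by
            simpa [h] using h2
          push_cast at h2'; omega
        · exfalso; push_cast at h1
          have h3' : (1 : Int) + ((List.takeWhile isDE rest).length : Int) ≥ min_length := by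
            simpa [h] using h3
          push_cast at h3'; omega
        · simp
      · rw [loopA]
        simp only [h, dif_neg, Bool.false_eq_true, not_false_iff]
        have hlen : rest.length ≤ f := by simp at hf; omega
        rw [ih rest hlen]
        have hrf : runsOf (c :: rest) = consRun false 1 (runsOf rest) := by
          rw [runsOf, Bool.eq_false_iff.mpr h]
        rw [hrf, emitB_consRun_false]
        norm_cast

-- ===== VERDICT (by name: the statement is the Claim_ definition above) =====
theorem find_de_rich_segments_spec : Claim_equal_find_de_rich_segments := by
  intro sequence min_length _
  unfold Spec_find_de_rich_segments find_de_rich_segments find_de_rich_segments_alt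
  rw [runs_spec, loopA_emitB sequence.toList.length sequence.toList le_rfl]
  simp
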